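-- pv_equiv track=rewrite | github.com/byte-pipe/tech-news | scraper/core/digest.py | _categorize_summaries
-- ===== SOURCE A (Python) =====
-- from typing import Any, Dict, List, Optional
--
-- def _categorize_summaries(summaries: List[Dict], categories: Dict[str, Any]) -> Dict[str, List[Dict]]:
--     """Score each summary against categories by keyword overlap.
--
--     Returns a dict mapping category keys to lists of summaries.
--     Articles that don't match any category go to 'uncategorized'.
--     """
--     result: Dict[str, List[Dict]] = {}
--
--     for s in summaries:
--         searchable = (s.get("title", "") + " " + s.get("body", "")).lower()
--         best_cat = "uncategorized"
--         best_score = 0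
--
--         for cat_key, cat_def in categories.items():
--             keywords = cat_def.get("keywords", [])
--             score = sum(1 for kw in keywords if kw.lower() in searchable)
--             if score > best_score:
--                 best_score = score
--                 best_cat = cat_key
--
--         result.setdefault(best_cat, []).append(s)
--
--     return result
-- ===== SOURCE B (Python) =====
-- from typing import Any, Dict, List
--
--
-- def _categorize_summaries(summaries: List[Dict], categories: Dict[str, Any]) -> Dict[str, List[Dict]]:
--     """Two-phase re-implementation: lowercase every keyword once up front,
--     label each summary via max/argmax over the score list, then build the
--     result by grouping (comprehension) instead of incremental setdefault."""
--     lowered = [(key, [kw.lower() for kw in cd.get("keywords", [])])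
--                for key, cd in categories.items()]
--
--     def label(s: Dict) -> str:
--         text = (s.get("title", "") + " " + s.get("body", "")).lower()
--         scores = [sum(kw in text for kw in kws) for _, kws in lowered]
--         best = max(scores, default=0)
--         if best == 0:
--             return "uncategorized"
--         return next((key for (key, _), sc in zip(lowered, scores) if sc == best),
--                     "uncategorized")
--
--     labels = [label(s) for s in summaries]
--     seen = list(dict.fromkeys(labels))
--     return {l: [s for s, x in zip(summaries, labels) if x == l] for l in seen}
-- ===== Notes on version B (the rewrite author's own statement) =====
-- stated objective: alternative
-- what changed: A's per-summary running-best scan that re-lowercases every keyword and its incremental setdefault-dict are replaced by a two-phase plan: keywords are lowercased once up front, each summary is labelled by max/argmax over its score list, and the result is built by grouping summaries by label in one comprehension.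
import Mathlib
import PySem

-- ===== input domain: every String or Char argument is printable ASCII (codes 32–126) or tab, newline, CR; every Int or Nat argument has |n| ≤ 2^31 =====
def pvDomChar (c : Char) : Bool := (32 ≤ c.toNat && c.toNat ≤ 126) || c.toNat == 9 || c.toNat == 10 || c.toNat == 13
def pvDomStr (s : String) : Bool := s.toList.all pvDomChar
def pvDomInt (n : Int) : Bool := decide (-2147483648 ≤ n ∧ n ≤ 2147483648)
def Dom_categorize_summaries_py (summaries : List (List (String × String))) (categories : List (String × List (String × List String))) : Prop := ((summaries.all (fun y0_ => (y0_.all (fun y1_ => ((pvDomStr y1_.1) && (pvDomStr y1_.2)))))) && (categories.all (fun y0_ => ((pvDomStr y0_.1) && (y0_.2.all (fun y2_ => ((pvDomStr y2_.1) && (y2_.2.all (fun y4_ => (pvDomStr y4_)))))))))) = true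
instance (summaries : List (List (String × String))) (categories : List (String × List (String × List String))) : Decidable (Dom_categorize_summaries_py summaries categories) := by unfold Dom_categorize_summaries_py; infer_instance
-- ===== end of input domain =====

-- B replaces A's per-summary running-best scan (which re-lowercases every keyword for every summary) and
-- A's incremental setdefault-dict by a two-phase plan: lowercase all keywords once, label each summary by
-- max/argmax over its score list, then group the summaries by label in a single comprehension.

-- ===== PORT A =====
-- d.get(k, dflt) on a Python dict passed in as an association list
def pvDictGet {ν : Type} (d : List (String × ν)) (k : String) (dflt : ν) : ν :=
  PySem.Dict.getD ⟨d⟩ k dflt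

-- (s.get("title","") + " " + s.get("body","")).lower()  (both Pythons compute this verbatim)
def pvSearchable (s : List (String × String)) : String :=
  PySem.Str.lower (pvDictGet s "title" "" ++ " " ++ pvDictGet s "body" "")

-- A's inner loop: running (best_cat, best_score) over categories.items()
def pvBestA (categories : List (String × List (String × List String))) (searchable : String) : String × Int :=
  categories.foldl (fun b c =>
    let keywords := pvDictGet c.2 "keywords" []
    let score : Int := keywords.foldl
      (fun acc kw => if PySem.Str.isIn (PySem.Str.lower kw) searchable then acc + 1 else acc) 0
    if score > b.2 then (c.1, score) else b) ("uncategorized", 0)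

def categorize_summaries_py (summaries : List (List (String × String))) (categories : List (String × List (String × List String))) : List (String × List (List (String × String))) :=
  (summaries.foldl
    (fun (result : PySem.Dict String (List (List (String × String)))) s =>
      result.modify (pvBestA categories (pvSearchable s)).1 [] (· ++ [s]))
    PySem.Dict.empty).items

-- ===== PORT B =====
-- lowered = [(key, [kw.lower() for kw in cd.get("keywords", [])]) for key, cd in categories.items()]
def pvLowered (categories : List (String × List (String × List String))) : List (String × List String) :=
  categories.map (fun c => (c.1, (pvDictGet c.2 "keywords" []).map PySem.Str.lower))

-- B's label(s): score list, max with default 0, first key attaining the max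
def pvLabelB (lowered : List (String × List String)) (s : List (String × String)) : String :=
  let text := pvSearchable s
  let scores : List Int :=
    lowered.map (fun c => (c.2.map (fun kw => if PySem.Str.isIn kw text then (1 : Int) else 0)).sum)
  let best := PySem.List.maxD scores (fun x => x) 0
  if best == 0 then "uncategorized"
  else (Option.map (fun p => p.1.1) ((lowered.zip scores).find? (fun p => p.2 == best))).getD "uncategorized"

def categorize_summaries_py_alt (summaries : List (List (String × String))) (categories : List (String × List (String × List String))) : List (String × List (List (String × String))) :=
  let labels := summaries.map (pvLabelB (pvLowered categories))
  (PySem.List.dedup labels).map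
    (fun l => (l, ((summaries.zip labels).filter (fun p => p.2 == l)).map (·.1)))

-- ===== PRECONDITION & SPEC =====
def Spec_categorize_summaries_py (summaries : List (List (String × String))) (categories : List (String × List (String × List String))) (out : List (String × List (List (String × String)))) : Prop := out = categorize_summaries_py_alt summaries categories
instance (summaries : List (List (String × String))) (categories : List (String × List (String × List String))) (out : List (String × List (List (String × String)))) : Decidable (Spec_categorize_summaries_py summaries categories out) := by unfold Spec_categorize_summaries_py; infer_instance

-- ===== CLAIM (what is proved, stated in full; the proofs are below) =====
def Claim_equal_categorize_summaries_py : Prop := ∀ (summaries : List (List (String × String))) (categories : List (String × List (String × List String))), Dom_categorize_summaries_py summaries categories → Spec_categorize_summaries_py summaries categories (categorize_summaries_py summaries categories)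

-- ===== LEMMAS AND PROOFS =====

-- A's strict-> running-best fold: unchanged when the running max stays at the seed,
-- otherwise the FIRST pair attaining the running max.
theorem foldl_best (ps : List (String × Int)) (bc : String) (bs : Int) :
    ps.foldl (fun b p => if p.2 > b.2 then p else b) (bc, bs)
      = if (ps.map (fun p => p.2)).foldl max bs = bs then (bc, bs)
        else (ps.find? (fun p => p.2 == (ps.map (fun p => p.2)).foldl max bs)).getD (bc, bs) := by
  induction ps generalizing bc bs with
  | nil => simp
  | cons hd t ih =>
    obtain ⟨k, v⟩ := hd
    simp only [List.foldl_cons, List.map_cons, List.find?_cons]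
    by_cases hv : v > bs
    · have hmax : max bs v = v := by omega
      rw [if_pos hv, hmax, ih k v]
      have hge : v ≤ (t.map (fun p => p.2)).foldl max v :=
        (PySem.List.le_foldl_max _ _).1
      by_cases he : (t.map (fun p => p.2)).foldl max v = v
      · rw [if_pos he]
        have hne : ¬ (t.map (fun p => p.2)).foldl max v = bs := by omega
        rw [if_neg hne]
        simp [he]
      · have hne : ¬ (t.map (fun p => p.2)).foldl max v = bs := by omega
        rw [if_neg he, if_neg hne]
        have hhd : (v == (t.map (fun p => p.2)).foldl max v) = false := by
          simp; omega
        rw [hhd]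
        have hmem : (t.map (fun p => p.2)).foldl max v ∈ t.map (fun p => p.2) := by
          rcases PySem.List.foldl_max_mem (t.map (fun p => p.2)) v with h | h
          · exact absurd h he
          · exact h
        rcases List.mem_map.mp hmem with ⟨q, hq, hq2⟩
        have hsome : (t.find? (fun p => p.2 == (t.map (fun p => p.2)).foldl max v)).isSome := by
          rw [List.find?_isSome]
          exact ⟨q, hq, by simp [hq2]⟩
        rcases Option.isSome_iff_exists.mp hsome with ⟨r, hr⟩
        simp [hr]
    · have hmax : max bs v = bs := by omega
      rw [if_neg hv, hmax, ih bc bs]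
      by_cases he : (t.map (fun p => p.2)).foldl max bs = bs
      · simp [he]
      · have hbs : bs ≤ (t.map (fun p => p.2)).foldl max bs := (PySem.List.le_foldl_max _ _).1
        have hhd : (v == (t.map (fun p => p.2)).foldl max bs) = false := by
          simp; omega
        simp [he, hhd]

theorem opt_fst {α : Type} (o : Option α) (g : α → String × Int) :
    ((Option.map g o).getD ("uncategorized", 0)).1
      = (Option.map (fun c => (g c).1) o).getD "uncategorized" := by
  cases o <;> rfl

-- A's per-summary label = B's per-summary label
theorem label_eq (categories : List (String × List (String × List String))) (s : List (String × String)) :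
    (pvBestA categories (pvSearchable s)).1 = pvLabelB (pvLowered categories) s := by
  have hA : pvBestA categories (pvSearchable s) =
      (categories.map (fun c => (c.1,
        ((pvDictGet c.2 "keywords" []).countP
          (fun kw => PySem.Str.isIn (PySem.Str.lower kw) (pvSearchable s)) : Int)))).foldl
        (fun b p => if p.2 > b.2 then p else b) ("uncategorized", 0) := by
    rw [pvBestA, List.foldl_map]
    apply PySem.List.foldl_congr_mem
    intro acc c hc
    simp only [PySem.List.foldl_if_add_one, zero_add]
  have hscores : (pvLowered categories).map
      (fun c => (c.2.map (fun kw => if PySem.Str.isIn kw (pvSearchable s) then (1 : Int) else 0)).sum)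
      = categories.map (fun c =>
        ((pvDictGet c.2 "keywords" []).countP
          (fun kw => PySem.Str.isIn (PySem.Str.lower kw) (pvSearchable s)) : Int)) := by
    rw [pvLowered, List.map_map]
    apply List.map_congr_left
    intro c _
    simp only [Function.comp_apply, PySem.List.sum_map_ite_one_zero, List.countP_map]
    rfl
  have hnonneg : ∀ x ∈ categories.map (fun c =>
        ((pvDictGet c.2 "keywords" []).countP
          (fun kw => PySem.Str.isIn (PySem.Str.lower kw) (pvSearchable s)) : Int)), 0 ≤ x := by
    intro x hx
    rcases List.mem_map.mp hx with ⟨c, _, rfl⟩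
    positivity
  have hmaxD : ∀ (l : List Int), (∀ x ∈ l, 0 ≤ x) →
      PySem.List.maxD l (fun x => x) 0 = l.foldl max 0 := by
    intro l hl
    cases l with
    | nil =>
      simp only [PySem.List.maxD]
      rw [show (PySem.List.max? ([] : List Int) (fun x => x)) = none from
        (PySem.List.max?_eq_none_iff _ _).mpr rfl]
      rfl
    | cons x t =>
      have hx : 0 ≤ x := hl x (by simp)
      have hmx : max 0 x = x := by omega
      simp only [PySem.List.maxD, PySem.List.max?_id_cons, Option.getD_some, List.foldl_cons, hmx]
  rw [hA, foldl_best, pvLabelB]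
  simp only [hscores, hmaxD _ hnonneg, List.map_map]
  simp only [Function.comp_def]
  by_cases hM : List.foldl max 0 (List.map (fun c =>
      ((List.countP (fun kw => PySem.Str.isIn (PySem.Str.lower kw) (pvSearchable s))
        (pvDictGet c.2 "keywords" []) : Int))) categories) = 0
  · simp only [beq_iff_eq, if_pos hM]
  · simp only [beq_iff_eq, if_neg hM]
    rw [pvLowered, List.zip_map', List.find?_map, List.find?_map, Option.map_map]
    simp only [Function.comp_def]
    rw [opt_fst]

-- a Dict with Nodup keys is its key list paired with its lookups
theorem list_items_eq {ν : Type} (l : List (String × ν)) (d0 : ν) (h : (l.map (fun p => p.1)).Nodup) :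
    l = (l.map (fun p => p.1)).map (fun k => (k, PySem.Dict.getD ⟨l⟩ k d0)) := by
  induction l with
  | nil => rfl
  | cons hd t ih =>
    obtain ⟨k, v⟩ := hd
    simp only [List.map_cons, List.nodup_cons] at h
    simp only [List.map_cons, List.cons.injEq, Prod.mk.injEq]
    refine ⟨⟨trivial, ?_⟩, ?_⟩
    · rw [PySem.Dict.getD_eq_get?_getD, PySem.Dict.get?_mk_cons]
      simp
    · have hstep : ∀ a ∈ t.map (fun p => p.1),
          (a, PySem.Dict.getD (⟨t⟩ : PySem.Dict String ν) a d0)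
            = (a, PySem.Dict.getD (⟨(k, v) :: t⟩ : PySem.Dict String ν) a d0) := by
        intro a ha
        have hne : ¬ (k == a) = true := by
          simp only [beq_iff_eq]
          intro he; subst he
          exact h.1 ha
        rw [PySem.Dict.getD_eq_get?_getD (d := ⟨(k, v) :: t⟩), PySem.Dict.get?_mk_cons,
          if_neg hne, ← PySem.Dict.getD_eq_get?_getD]
      calc t = (t.map (fun p => p.1)).map
              (fun a => (a, PySem.Dict.getD (⟨t⟩ : PySem.Dict String ν) a d0)) := ih h.2
        _ = (t.map (fun p => p.1)).map
              (fun a => (a, PySem.Dict.getD (⟨(k, v) :: t⟩ : PySem.Dict String ν) a d0)) :=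
            List.map_congr_left hstep

theorem dict_items_eq {ν : Type} (d : PySem.Dict String ν) (d0 : ν) (h : d.keys.Nodup) :
    d.items = d.keys.map (fun k => (k, d.getD k d0)) := by
  obtain ⟨l⟩ := d
  exact list_items_eq l d0 h

theorem zip_self_map {α β : Type} (l : List α) (f : α → β) :
    l.zip (l.map f) = l.map (fun x => (x, f x)) := by
  induction l with
  | nil => rfl
  | cons hd t ih => simp [ih]

-- ===== VERDICT (by name: the statement is the Claim_ definition above) =====
theorem categorize_summaries_py_spec : Claim_equal_categorize_summaries_py := by
  intro summaries categories _
  show categorize_summaries_py summaries categories = categorize_summaries_py_alt summaries categories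
  unfold categorize_summaries_py categorize_summaries_py_alt
  have hlab : summaries.map (pvLabelB (pvLowered categories))
      = summaries.map (fun s => (pvBestA categories (pvSearchable s)).1) :=
    List.map_congr_left (fun s _ => (label_eq categories s).symm)
  simp only [hlab, PySem.List.dedup_eq_ofList, zip_self_map]
  have hAfold : summaries.foldl
      (fun (result : PySem.Dict String (List (List (String × String)))) s =>
        result.modify (pvBestA categories (pvSearchable s)).1 [] (· ++ [s])) PySem.Dict.empty
      = (summaries.map (fun s => ((pvBestA categories (pvSearchable s)).1, s))).foldl
          (fun d p => d.modify p.1 [] (· ++ [p.2])) PySem.Dict.empty := by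
    rw [List.foldl_map]
  rw [hAfold]
  set pairs := summaries.map (fun s => ((pvBestA categories (pvSearchable s)).1, s)) with hpairs
  set d := pairs.foldl (fun d p => d.modify p.1 [] (· ++ [p.2])) PySem.Dict.empty with hd
  have hkeys : d.keys = PySem.Set.ofList (pairs.map (fun p => p.1)) := by
    rw [hd]
    exact PySem.Dict.keys_foldl_modify_key pairs (fun p => p.1) []
      (fun d p => (· ++ [p.2])) PySem.Dict.empty
  have hnodup : d.keys.Nodup := by
    rw [hd]
    exact PySem.Dict.nodup_keys_foldl_modify_key pairs (fun p => p.1) []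
      (fun d p => (· ++ [p.2])) PySem.Dict.empty PySem.Dict.nodup_keys_empty
  have hpl : pairs.map (fun p => p.1) = summaries.map (fun s => (pvBestA categories (pvSearchable s)).1) := by
    rw [hpairs, List.map_map]
    rfl
  rw [dict_items_eq d [] hnodup, hkeys, hpl]
  apply List.map_congr_left
  intro k hk
  have hget : d.getD k [] = (pairs.filter (fun p => p.1 == k)).map (fun p => p.2) := by
    rw [hd, PySem.Dict.getD_foldl_modify_append]
    simp [pysem]
  rw [hget, hpairs]
  rw [List.filter_map, List.map_map, List.filter_map, List.map_map]
  simp only [Function.comp_def]
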